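-- pv_equiv track=rewrite | github.com/Metta-AI/mettagrid | python/src/mettagrid/runner/episode_runner.py | _per_agent_policy_mapping
-- ===== SOURCE A (Python) =====
-- def _per_agent_policy_mapping(
--     local_policy_uris: list[str],
--     assignments: list[int],
--     num_agents: int,
-- ) -> tuple[list[str], list[int], dict[int, int]]:
--     if len(assignments) != num_agents or not all(
--         0 <= assignment < len(local_policy_uris) for assignment in assignments
--     ):
--         raise ValueError("Assignments must match agent count and be within policy range")
--
--     # Launch one policy server per referenced policy index, not per agent.
--     # This preserves assignment semantics while avoiding N-agent process blowups.
--     policy_index_remap: dict[int, int] = {}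
--     compact_policy_uris: list[str] = []
--     compact_assignments: list[int] = []
--     for assignment in assignments:
--         remapped_index = policy_index_remap.get(assignment)
--         if remapped_index is None:
--             remapped_index = len(compact_policy_uris)
--             policy_index_remap[assignment] = remapped_index
--             compact_policy_uris.append(local_policy_uris[assignment])
--         compact_assignments.append(remapped_index)
--     return compact_policy_uris, compact_assignments, policy_index_remap
-- ===== SOURCE B (Python) =====
-- def _per_agent_policy_mapping(
--     local_policy_uris: list[str],
--     assignments: list[int],
--     num_agents: int,
-- ) -> tuple[list[str], list[int], dict[int, int]]:
--     if len(assignments) != num_agents or not all(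
--         0 <= assignment < len(local_policy_uris) for assignment in assignments
--     ):
--         raise ValueError("Assignments must match agent count and be within policy range")
--
--     # Positional formulation: no mutable seen-set/dict state at all.  An index is
--     # 'unique' exactly at its first occurrence (assignments.index(a) == i), and a
--     # compact index is simply a position in that first-occurrence list.
--     unique = [a for i, a in enumerate(assignments) if assignments.index(a) == i]
--     compact_policy_uris = [local_policy_uris[a] for a in unique]
--     compact_assignments = [unique.index(a) for a in assignments]
--     policy_index_remap = {a: unique.index(a) for a in unique}
--     return compact_policy_uris, compact_assignments, policy_index_remap
-- ===== Notes on version B (the rewrite author's own statement) =====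
-- stated objective: alternative
-- what changed: Replaces A's single stateful loop (dict + growing lists updated per agent) by a stateless positional formulation: elements are classified by comparing their position with list.index (first occurrence), and every output is a comprehension over list.index positions; trades O(n) for O(n^2) in exchange for having no incremental state.
import Mathlib
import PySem

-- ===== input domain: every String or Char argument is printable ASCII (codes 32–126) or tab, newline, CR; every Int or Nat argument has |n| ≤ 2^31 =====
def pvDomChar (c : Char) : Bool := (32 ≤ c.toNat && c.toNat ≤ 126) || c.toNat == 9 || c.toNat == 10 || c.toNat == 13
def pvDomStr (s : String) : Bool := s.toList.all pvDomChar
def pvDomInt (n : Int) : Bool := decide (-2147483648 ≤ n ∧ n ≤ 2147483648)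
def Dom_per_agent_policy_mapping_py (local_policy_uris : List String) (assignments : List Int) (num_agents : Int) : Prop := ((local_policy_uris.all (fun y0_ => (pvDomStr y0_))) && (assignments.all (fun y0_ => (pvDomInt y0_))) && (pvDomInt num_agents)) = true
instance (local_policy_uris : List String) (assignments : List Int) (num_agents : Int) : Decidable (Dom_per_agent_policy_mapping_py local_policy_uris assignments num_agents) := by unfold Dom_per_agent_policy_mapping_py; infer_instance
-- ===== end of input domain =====

-- B replaces A's single stateful loop (dict + growing lists) by a stateless positional
-- formulation via list.index / comprehensions; same outputs, same ValueError condition.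


-- ===== PORT A =====
-- A raises ValueError when the validation fails; the port returns ([], [], []) there (those inputs are excluded by Pre_).
-- local_policy_uris[assignment] is ported as pyGetD with default "": exact, since the validation guarantees 0 ≤ assignment < len.
def per_agent_policy_mapping_py (local_policy_uris : List String) (assignments : List Int) (num_agents : Int) : List String × List Int × (List (Int × Int)) :=
  if ¬((assignments.length : Int) = num_agents ∧ ∀ a ∈ assignments, 0 ≤ a ∧ a < (local_policy_uris.length : Int)) then
    ([], [], [])
  else
    let st := assignments.foldl
      (fun (st : PySem.Dict Int Int × List String × List Int) assignment =>
        match st.1.get? assignment with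
        | some r => (st.1, st.2.1, st.2.2 ++ [r])
        | none =>
          (st.1.insert assignment (st.2.1.length : Int),
           st.2.1 ++ [PySem.List.pyGetD local_policy_uris assignment ""],
           st.2.2 ++ [(st.2.1.length : Int)]))
      (PySem.Dict.empty, [], [])
    (st.2.1, st.2.2, st.1.items)

-- ===== PORT B =====
-- Same ValueError condition, ported the same way.  unique.index(a) is ported as
-- (index? unique a).getD 0 cast to Int: exact, since a is always a member of unique
-- where B calls it; local_policy_uris[a] as pyGetD "" is exact by the validation.
def per_agent_policy_mapping_py_alt (local_policy_uris : List String) (assignments : List Int) (num_agents : Int) : List String × List Int × (List (Int × Int)) :=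
  if ¬((assignments.length : Int) = num_agents ∧ ∀ a ∈ assignments, 0 ≤ a ∧ a < (local_policy_uris.length : Int)) then
    ([], [], [])
  else
    let unique := ((PySem.List.enumerate assignments 0).filter
        (fun p => (PySem.List.index? assignments p.2).map Int.ofNat == some p.1)).map (fun p => p.2)
    let compact_policy_uris := unique.map (fun a => PySem.List.pyGetD local_policy_uris a "")
    let compact_assignments := assignments.map (fun a => (((PySem.List.index? unique a).getD 0 : Nat) : Int))
    let policy_index_remap := unique.foldl
      (fun (d : PySem.Dict Int Int) a => d.insert a (((PySem.List.index? unique a).getD 0 : Nat) : Int))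
      PySem.Dict.empty
    (compact_policy_uris, compact_assignments, policy_index_remap.items)

-- ===== PRECONDITION & SPEC =====
-- Pre_ excludes exactly the inputs on which A raises ValueError (length mismatch or out-of-range assignment).
def Pre_per_agent_policy_mapping_py (local_policy_uris : List String) (assignments : List Int) (num_agents : Int) : Prop :=
  (assignments.length : Int) = num_agents ∧ ∀ a ∈ assignments, 0 ≤ a ∧ a < (local_policy_uris.length : Int)
instance (local_policy_uris : List String) (assignments : List Int) (num_agents : Int) : Decidable (Pre_per_agent_policy_mapping_py local_policy_uris assignments num_agents) := by unfold Pre_per_agent_policy_mapping_py; infer_instance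

def pvWitness_per_agent_policy_mapping_py : List String × List Int × Int := (["p0", "p1"], [1, 0, 1], 3)

def Spec_per_agent_policy_mapping_py (local_policy_uris : List String) (assignments : List Int) (num_agents : Int) (out : List String × List Int × (List (Int × Int))) : Prop := out = per_agent_policy_mapping_py_alt local_policy_uris assignments num_agents
instance (local_policy_uris : List String) (assignments : List Int) (num_agents : Int) (out : List String × List Int × (List (Int × Int))) : Decidable (Spec_per_agent_policy_mapping_py local_policy_uris assignments num_agents out) := by unfold Spec_per_agent_policy_mapping_py; infer_instance

-- ===== CLAIM (what is proved, stated in full; the proofs are below) =====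
def Claim_equal_per_agent_policy_mapping_py : Prop := ∀ (local_policy_uris : List String) (assignments : List Int) (num_agents : Int), Dom_per_agent_policy_mapping_py local_policy_uris assignments num_agents → Pre_per_agent_policy_mapping_py local_policy_uris assignments num_agents → Spec_per_agent_policy_mapping_py local_policy_uris assignments num_agents (per_agent_policy_mapping_py local_policy_uris assignments num_agents)

-- ===== LEMMAS AND PROOFS =====

-- association list (a, position) for the unique list u, positions starting at s
def pvAssocFrom (s : Int) : List Int → List (Int × Int)
  | [] => []
  | a :: u => (a, s) :: pvAssocFrom (s + 1) u

theorem pvAssocFrom_append (v w : List Int) : ∀ s, pvAssocFrom s (v ++ w) = pvAssocFrom s v ++ pvAssocFrom (s + v.length) w := by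
  induction v with
  | nil => intro s; simp [pvAssocFrom]
  | cons a v ih =>
    intro s
    simp only [List.cons_append, pvAssocFrom, ih (s + 1), List.length_cons]
    rw [show s + 1 + (v.length : Int) = s + ((v.length + 1 : Nat) : Int) by push_cast; ring]

theorem pv_get?_assoc_of_not_mem (a : Int) (u : List Int) (h : a ∉ u) : ∀ s, (PySem.Dict.mk (pvAssocFrom s u)).get? a = none := by
  induction u with
  | nil => intro s; exact PySem.Dict.get?_empty a
  | cons b u ih =>
    intro s
    rw [pvAssocFrom, PySem.Dict.get?_mk_cons]
    simp only [List.mem_cons, not_or] at h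
    rw [if_neg (by simpa using Ne.symm h.1), ih h.2]

theorem pv_get?_assoc_append_left (a : Int) (u w : List Int) (h : a ∈ u) : ∀ s, (PySem.Dict.mk (pvAssocFrom s (u ++ w))).get? a = (PySem.Dict.mk (pvAssocFrom s u)).get? a := by
  induction u with
  | nil => cases h
  | cons b u ih =>
    intro s
    rw [List.cons_append, pvAssocFrom, pvAssocFrom, PySem.Dict.get?_mk_cons, PySem.Dict.get?_mk_cons]
    by_cases hb : b = a
    · simp [hb]
    · rw [if_neg (by simp [hb]), if_neg (by simp [hb])]
      exact ih ((List.mem_cons.mp h).resolve_left (fun hh => hb hh.symm)) (s + 1)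

theorem pv_get?_assoc_append_self (a : Int) (u : List Int) (h : a ∉ u) : ∀ s, (PySem.Dict.mk (pvAssocFrom s (u ++ [a]))).get? a = some (s + u.length) := by
  induction u with
  | nil => intro s; simp [pvAssocFrom, PySem.Dict.get?_mk_cons]
  | cons b u ih =>
    intro s
    simp only [List.mem_cons, not_or] at h
    rw [List.cons_append, pvAssocFrom, PySem.Dict.get?_mk_cons, if_neg (by simpa using Ne.symm h.1),
      ih h.2 (s + 1), List.length_cons]
    congr 1
    push_cast
    ring

theorem pv_add_of_mem (u : List Int) (a : Int) (h : a ∈ u) : PySem.Set.add u a = u := by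
  simp [PySem.Set.add, h]

theorem pv_add_of_not_mem (u : List Int) (a : Int) (h : a ∉ u) : PySem.Set.add u a = u ++ [a] := by
  simp [PySem.Set.add, h]

theorem pv_prefix_foldl_add (l : List Int) : ∀ u : List Int, u <+: l.foldl PySem.Set.add u := by
  induction l with
  | nil => intro u; simp
  | cons a l ih =>
    intro u
    refine List.IsPrefix.trans ?_ (ih (PySem.Set.add u a))
    by_cases h : a ∈ u
    · rw [pv_add_of_mem u a h]
    · rw [pv_add_of_not_mem u a h]; exact ⟨[a], rfl⟩

-- lookup in the final dedup dict is stable: members of a prefix keep their value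
theorem pv_get?_final (a : Int) (u u' : List Int) (hpre : u <+: u') (h : a ∈ u) : (PySem.Dict.mk (pvAssocFrom 0 u')).get? a = (PySem.Dict.mk (pvAssocFrom 0 u)).get? a := by
  obtain ⟨w, rfl⟩ := hpre
  exact pv_get?_assoc_append_left a u w h 0

-- membership in the prefix means the dedup dict has a value there
theorem pv_get?_assoc_of_mem (a : Int) (u : List Int) (h : a ∈ u) : ∀ s, ∃ r, (PySem.Dict.mk (pvAssocFrom s u)).get? a = some r := by
  induction u with
  | nil => cases h
  | cons b u ih =>
    intro s
    rw [pvAssocFrom, PySem.Dict.get?_mk_cons]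
    by_cases hb : b = a
    · exact ⟨s, by simp [hb]⟩
    · rw [if_neg (by simp [hb])]
      exact ih ((List.mem_cons.mp h).resolve_left (fun hh => hb hh.symm)) (s + 1)

-- the dict built from pvAssocFrom looks up the POSITION of its key (index?)
theorem pv_get?_assoc_eq_index (a : Int) (u : List Int) (h : a ∈ u) : ∀ s, (PySem.Dict.mk (pvAssocFrom s u)).get? a = (PySem.List.index? u a).map (fun k => s + (k : Int)) := by
  induction u with
  | nil => cases h
  | cons b u ih =>
    intro s
    rw [pvAssocFrom, PySem.Dict.get?_mk_cons]
    by_cases hb : b = a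
    · subst hb
      rw [if_pos (by simp), PySem.List.index?_cons_self]
      simp
    · rw [if_neg (by simp [hb]), PySem.List.index?_cons_of_ne u hb,
        ih ((List.mem_cons.mp h).resolve_left (fun hh => hb hh.symm)) (s + 1)]
      cases h' : PySem.List.index? u a with
      | none => rfl
      | some k =>
        simp
        omega

-- B's first-occurrence filter computes exactly the dedup-in-order list foldl Set.add []
theorem pv_unique_eq (l : List Int) :
    ((PySem.List.enumerate l 0).filter
      (fun p => (PySem.List.index? l p.2).map Int.ofNat == some p.1)).map (fun p => p.2)
    = l.foldl PySem.Set.add [] := by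
  induction l using List.reverseRecOn with
  | nil => rfl
  | append_singleton l a ih =>
    rw [List.foldl_append, List.foldl_cons, List.foldl_nil,
      PySem.List.enumerate_append, List.filter_append, List.map_append]
    have hfc : ∀ p ∈ PySem.List.enumerate l 0,
        ((PySem.List.index? (l ++ [a]) p.2).map Int.ofNat == some p.1)
        = ((PySem.List.index? l p.2).map Int.ofNat == some p.1) := by
      intro p hp
      obtain ⟨k, hk, rfl⟩ := (PySem.List.mem_enumerate_iff _ _ _).mp hp
      rw [PySem.List.index?_append_of_mem _ (List.getElem_mem hk)]
    rw [List.filter_congr hfc, ih]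
    by_cases hmem : a ∈ l
    · rw [pv_add_of_mem _ _ (by rw [← PySem.Set.ofList_eq_foldl]; exact (PySem.Set.mem_ofList _ _).mpr hmem)]
      obtain ⟨k, hk⟩ := (PySem.List.index?_isSome_iff l a).mpr hmem |> Option.isSome_iff_exists.mp
      have hlt : k < l.length := (PySem.List.getElem_of_index?_eq_some hk).1
      have hfalse : ((PySem.List.index? (l ++ [a]) a).map Int.ofNat == some ((0 : Int) + (l.length : Int))) = false := by
        rw [PySem.List.index?_append_of_mem _ hmem, hk]
        simp only [Option.map_some]
        simpa using fun hkk => absurd (by exact_mod_cast hkk) (Nat.ne_of_lt hlt)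
      simp only [PySem.List.enumerate_cons, PySem.List.enumerate_nil, List.filter_cons, hfalse]
      simp
    · rw [pv_add_of_not_mem _ _ (by rw [← PySem.Set.ofList_eq_foldl]; simpa [PySem.Set.mem_ofList] using hmem)]
      have htrue : ((PySem.List.index? (l ++ [a]) a).map Int.ofNat == some ((0 : Int) + (l.length : Int))) = true := by
        rw [PySem.List.index?_append_singleton_self l a hmem]
        simp
      simp only [PySem.List.enumerate_cons, PySem.List.enumerate_nil, List.filter_cons, htrue]
      simp

-- mapping each element of a nodup list to (element, its index) is pvAssocFrom
theorem pv_map_index (u : List Int) (hnd : u.Nodup) : ∀ s : Int,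
    u.map (fun a => (a, s + (((PySem.List.index? u a).getD 0 : Nat) : Int))) = pvAssocFrom s u := by
  induction u with
  | nil => intro s; rfl
  | cons b u ih =>
    intro s
    rw [List.map_cons, pvAssocFrom, PySem.List.index?_cons_self]
    have hbn : b ∉ u := (List.nodup_cons.mp hnd).1
    have hcong : ∀ a ∈ u, (fun a => (a, s + (((PySem.List.index? (b :: u) a).getD 0 : Nat) : Int))) a
        = (fun a => (a, (s + 1) + (((PySem.List.index? u a).getD 0 : Nat) : Int))) a := by
      intro a ha
      have hne : b ≠ a := fun hh => hbn (hh ▸ ha)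
      obtain ⟨k, hk⟩ := (PySem.List.index?_isSome_iff u a).mpr ha |> Option.isSome_iff_exists.mp
      simp only [PySem.List.index?_cons_of_ne u hne, hk, Option.map_some, Option.getD_some,
        Prod.mk.injEq, true_and]
      push_cast; ring
    rw [List.map_congr_left hcong, ih (List.nodup_cons.mp hnd).2 (s + 1)]
    simp

-- the invariant of A's single loop, stated against the dedup list and its assoc dict
theorem pv_main (uris : List String) (l : List Int) : ∀ (u : List Int) (ca : List Int), u.Nodup →
    l.foldl
      (fun (st : PySem.Dict Int Int × List String × List Int) assignment =>
        match st.1.get? assignment with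
        | some r => (st.1, st.2.1, st.2.2 ++ [r])
        | none =>
          (st.1.insert assignment (st.2.1.length : Int),
           st.2.1 ++ [PySem.List.pyGetD uris assignment ""],
           st.2.2 ++ [(st.2.1.length : Int)]))
      (PySem.Dict.mk (pvAssocFrom 0 u), u.map (fun a => PySem.List.pyGetD uris a ""), ca)
    = (PySem.Dict.mk (pvAssocFrom 0 (l.foldl PySem.Set.add u)),
       (l.foldl PySem.Set.add u).map (fun a => PySem.List.pyGetD uris a ""),
       ca ++ l.map (fun a => ((PySem.Dict.mk (pvAssocFrom 0 (l.foldl PySem.Set.add u))).get? a).getD 0)) := by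
  induction l with
  | nil => intro u ca _; simp
  | cons a l ih =>
    intro u ca hnd
    rw [List.foldl_cons, List.foldl_cons, List.map_cons]
    by_cases h : a ∈ u
    · obtain ⟨r, hr⟩ := pv_get?_assoc_of_mem a u h 0
      rw [hr, pv_add_of_mem u a h]
      have hfin : ((PySem.Dict.mk (pvAssocFrom 0 (l.foldl PySem.Set.add u))).get? a).getD 0 = r := by
        rw [pv_get?_final a u _ (pv_prefix_foldl_add l u) h, hr]; rfl
      rw [hfin]
      have := ih u (ca ++ [r]) hnd
      simp only [List.append_assoc, List.cons_append, List.nil_append] at this ⊢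
      exact this
    · rw [pv_get?_assoc_of_not_mem a u h 0, pv_add_of_not_mem u a h]
      have hins : (PySem.Dict.mk (pvAssocFrom 0 u)).insert a (((u.map (fun a => PySem.List.pyGetD uris a "")).length : Nat) : Int)
          = PySem.Dict.mk (pvAssocFrom 0 (u ++ [a])) := by
        apply PySem.Dict.ext
        rw [PySem.Dict.items_insert_of_not_contains _ _
          ((PySem.Dict.get?_eq_none_iff_contains _ _).mp (pv_get?_assoc_of_not_mem a u h 0))]
        show pvAssocFrom 0 u ++ [(a, ((u.map (fun a => PySem.List.pyGetD uris a "")).length : Int))] = _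
        rw [pvAssocFrom_append u [a] 0]
        simp [pvAssocFrom]
      have hnd' : (u ++ [a]).Nodup := by
        rw [List.nodup_append]
        refine ⟨hnd, List.nodup_singleton a, ?_⟩
        intro x hx y hy
        simp only [List.mem_singleton] at hy
        subst hy
        exact fun hxa => h (hxa ▸ hx)
      have hmapcons : u.map (fun a => PySem.List.pyGetD uris a "") ++ [PySem.List.pyGetD uris a ""]
          = (u ++ [a]).map (fun a => PySem.List.pyGetD uris a "") := by simp
      have hfin : ((PySem.Dict.mk (pvAssocFrom 0 (l.foldl PySem.Set.add (u ++ [a])))).get? a).getD 0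
          = ((u.map (fun a => PySem.List.pyGetD uris a "")).length : Int) := by
        rw [pv_get?_final a (u ++ [a]) _ (pv_prefix_foldl_add l (u ++ [a])) (by simp),
          pv_get?_assoc_append_self a u h 0]
        simp
      rw [hfin]
      have := ih (u ++ [a]) (ca ++ [((u.map (fun a => PySem.List.pyGetD uris a "")).length : Int)]) hnd'
      rw [hins, hmapcons]
      simp only [List.append_assoc, List.cons_append, List.nil_append] at this ⊢
      exact this

-- ===== VERDICT (by name: the statement is the Claim_ definition above) =====
theorem per_agent_policy_mapping_py_spec : Claim_equal_per_agent_policy_mapping_py := by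
  intro uris assignments num_agents _ hpre
  unfold Spec_per_agent_policy_mapping_py per_agent_policy_mapping_py per_agent_policy_mapping_py_alt
  unfold Pre_per_agent_policy_mapping_py at hpre
  rw [if_neg (not_not_intro hpre), if_neg (not_not_intro hpre)]
  have hnodup : (assignments.foldl PySem.Set.add []).Nodup := by
    rw [← PySem.Set.ofList_eq_foldl]; exact PySem.Set.nodup_ofList assignments
  have hmem : ∀ a ∈ assignments, a ∈ assignments.foldl PySem.Set.add [] := by
    intro a ha
    rw [← PySem.Set.ofList_eq_foldl]; exact (PySem.Set.mem_ofList _ _).mpr ha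
  have hmain := pv_main uris assignments [] [] List.nodup_nil
  simp only [pvAssocFrom, List.map_nil, List.nil_append,
    show ({ items := [] } : PySem.Dict Int Int) = PySem.Dict.empty from rfl] at hmain
  simp only [show (PySem.Set.empty : PySem.Set Int) = ([] : List Int) from rfl]
  rw [pv_unique_eq assignments, hmain]
  refine Prod.ext rfl (Prod.ext ?_ ?_)
  · -- compact_assignments agree
    show List.map _ assignments = List.map _ assignments
    apply List.map_congr_left
    intro a ha
    rw [pv_get?_assoc_eq_index a _ (hmem a ha) 0]
    obtain ⟨k, hk⟩ := (PySem.List.index?_isSome_iff _ a).mpr (hmem a ha) |> Option.isSome_iff_exists.mp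
    rw [hk]
    simp
  · -- remap dicts agree
    show (PySem.Dict.mk (pvAssocFrom 0 (assignments.foldl PySem.Set.add []))).items = _
    rw [show (fun (d : PySem.Dict Int Int) (a : Int) =>
          d.insert a (((PySem.List.index? (assignments.foldl PySem.Set.add []) a).getD 0 : Nat) : Int))
        = (fun (d : PySem.Dict Int Int) (a : Int) => d.insert ((fun x : Int => x) a)
          ((fun x : Int => (((PySem.List.index? (assignments.foldl PySem.Set.add []) x).getD 0 : Nat) : Int)) a)) from rfl,
      PySem.Dict.items_foldl_insert_fresh _ _ _ PySem.Dict.empty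
        (fun p _ => PySem.Dict.contains_empty p) (by simpa using hnodup)]
    show pvAssocFrom 0 _ = [] ++ List.map _ _
    rw [List.nil_append, ← pv_map_index _ hnodup 0]
    apply List.map_congr_left
    intro a _
    simp
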